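-- pv_equiv track=rewrite | github.com/sql-machine-learning/sqlflow | python/runtime/optimize/model_generation.py | find_matched_aggregation_function_brackets
-- ===== SOURCE A (Python) =====
-- def try_convert_to_aggregation_function(token):
--     """
--     This method tries to convert the given token to be an aggregation
--     function name. Return None if failure.
--
--     Args:
--         token (str): the given token to be converted.
--
--     Returns:
--         Return the converted aggregation function name if the conversion
--         succeeds. Otherwise, return None.
--     """
--     AGGREGATION_FUNCTIONS = {
--         'SUM': 'sum',
--     }
--     return AGGREGATION_FUNCTIONS.get(token, None)
--
-- def find_prev_non_blank_token(tokens, i):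
--     """
--     Find previous non-blank token before index i (including i).
--
--     Args:
--         tokens (list[str]): a string token list.
--         i (int): the position to search.
--
--     Returns:
--         If any token is found, return the found token.
--         Otherwise, return None.
--     """
--     if i < 0 or i >= len(tokens):
--         return None
--
--     while i >= 0:
--         if tokens[i].strip():
--             return tokens[i]
--
--         i -= 1
--
--     return None
--
-- def find_matched_aggregation_function_brackets(tokens, i):
--     """
--     Find the indices of the matched brackets which belong to
--     the aggregation function.
--
--     Args:
--         tokens (list[str]): a string token list.
--         i (int): the position to search.
--
--     Returns:
--         A tuple of (left_bracket_indices, right_bracket_indices, next_idx),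
--         where left_bracket_indices and right_bracket_indices are the
--         found left and right bracket index lists respectively, and next_idx
--         is the next position to search.
--     """
--     left_bracket_num = 0
--     left_bracket_indices = []
--     right_bracket_indices = []
--     while i < len(tokens):
--         if tokens[i] == '(':
--             left_bracket_indices.append(i)
--             right_bracket_indices.append(-1)
--             left_bracket_num += 1
--         elif tokens[i] == ')':
--             if left_bracket_num <= 0:
--                 raise ValueError("bracket not match")
--             left_bracket_num -= 1
--             right_bracket_indices[left_bracket_num] = i
--             if left_bracket_num == 0:
--                 i += 1
--                 break
--
--         i += 1
--
--     if left_bracket_num != 0: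
--         raise ValueError("bracket not match")
--
--     agg_left_bracket_indices = []
--     agg_right_bracket_indices = []
--     for left_idx, right_idx in zip(left_bracket_indices,
--                                    right_bracket_indices):
--         token = find_prev_non_blank_token(tokens, left_idx - 1)
--         if try_convert_to_aggregation_function(token):
--             agg_left_bracket_indices.append(left_idx)
--             agg_right_bracket_indices.append(right_idx)
--
--     i = min(i, len(tokens))
--     return agg_left_bracket_indices, agg_right_bracket_indices, i
-- ===== SOURCE B (Python) =====
-- def find_matched_aggregation_function_brackets(tokens, i):
--     n = len(tokens)
--
--     # One forward pass: prev[k] is the nearest non-blank token at index <= k.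
--     prev = []
--     last = None
--     for t in tokens:
--         if t.strip():
--             last = t
--         prev.append(last)
--
--     AGGREGATION_FUNCTIONS = {'SUM': 'sum'}
--
--     lefts = []      # (index of '(', is-aggregation flag, decided on the spot)
--     right_at = {}   # depth slot -> index of the last ')' closing that slot
--     depth = 0
--     while i < n:
--         t = tokens[i]
--         if t == '(':
--             p = prev[i - 1] if i >= 1 else None
--             lefts.append((i, p in AGGREGATION_FUNCTIONS))
--             depth += 1
--         elif t == ')':
--             if depth <= 0:
--                 raise ValueError("bracket not match")
--             depth -= 1
--             right_at[depth] = i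
--             if depth == 0:
--                 i += 1
--                 break
--         i += 1
--
--     if depth != 0:
--         raise ValueError("bracket not match")
--
--     agg_left_bracket_indices = []
--     agg_right_bracket_indices = []
--     for k, (l, a) in enumerate(lefts):
--         if a:
--             agg_left_bracket_indices.append(l)
--             agg_right_bracket_indices.append(right_at.get(k, -1))
--     return agg_left_bracket_indices, agg_right_bracket_indices, min(i, n)
-- ===== Notes on version B (the rewrite author's own statement) =====
-- stated objective: alternative
-- what changed: B precomputes the nearest-left-non-blank token for every index in one forward pass and decides the aggregation flag at the moment each '(' is pushed, so A's per-bracket backward scans and its whole second zip-and-rescan pass disappear; right-bracket slots are kept in a dict instead of a placeholder list rewritten in place.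
import Mathlib
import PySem

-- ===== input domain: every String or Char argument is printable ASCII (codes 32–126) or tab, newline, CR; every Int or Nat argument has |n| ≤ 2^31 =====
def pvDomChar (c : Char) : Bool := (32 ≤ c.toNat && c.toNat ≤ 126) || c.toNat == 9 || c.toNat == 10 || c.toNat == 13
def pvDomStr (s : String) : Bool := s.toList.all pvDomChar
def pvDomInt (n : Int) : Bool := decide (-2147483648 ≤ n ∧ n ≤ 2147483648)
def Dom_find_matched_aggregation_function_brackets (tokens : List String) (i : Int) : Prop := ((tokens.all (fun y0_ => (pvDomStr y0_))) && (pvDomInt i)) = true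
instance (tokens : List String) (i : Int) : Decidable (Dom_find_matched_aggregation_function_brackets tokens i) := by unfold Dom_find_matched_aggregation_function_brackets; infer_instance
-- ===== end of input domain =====

-- B replaces A's per-bracket backward scans (and A's whole second rescan pass) by one
-- forward precomputation of the nearest-left-non-blank token; equivalence is proved on
-- all inputs on which A returns (Pre_ excludes exactly A's ValueError/IndexError raises).

-- ===== PORT A =====

-- AGGREGATION_FUNCTIONS.get(token, None) with the one-entry dict {'SUM': 'sum'}
def pvTryConvert (token : Option String) : Option String :=
  if token == some "SUM" then some "sum" else none

-- the `while i >= 0` descending scan of find_prev_non_blank_token, i already in [0, len)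
def pvFindPrevAux (tokens : List String) : Nat → Option String
  | 0 => if PySem.Str.strip (tokens.getD 0 "") ≠ "" then some (tokens.getD 0 "") else none
  | k+1 => if PySem.Str.strip (tokens.getD (k+1) "") ≠ "" then some (tokens.getD (k+1) "")
           else pvFindPrevAux tokens k

def find_prev_non_blank_token (tokens : List String) (i : Int) : Option String :=
  if i < 0 ∨ (tokens.length : Int) ≤ i then none
  else pvFindPrevAux tokens i.toNat

-- A's while loop; fuel = number of remaining iterations (n - i); result none = raise
-- (ValueError on unmatched ')'; IndexError via pyGet? on tokens[i]).
-- `right_bracket_indices[left_bracket_num] = i` is List.set at the (checked non-negative,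
-- in-range on non-raising runs) index — exact for Python list assignment there.
def pvALoop (tokens : List String) :
    Nat → Int → Int → List Int → List Int → Option (List Int × List Int × Int × Int)
  | 0, i, d, L, R => some (L, R, i, d)
  | f+1, i, d, L, R =>
    match PySem.List.pyGet? tokens i with
    | none => none
    | some t =>
      if t == "(" then pvALoop tokens f (i+1) (d+1) (L ++ [i]) (R ++ [-1])
      else if t == ")" then
        if d ≤ 0 then none
        else if d - 1 == 0 then some (L, R.set (d-1).toNat i, i+1, 0)
        else pvALoop tokens f (i+1) (d-1) L (R.set (d-1).toNat i)
      else pvALoop tokens f (i+1) d L R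

def find_matched_aggregation_function_brackets (tokens : List String) (i : Int) : List Int × List Int × Int :=
  match pvALoop tokens ((tokens.length : Int) - i).toNat i 0 [] [] with
  | none => ([], [], 0)                      -- A raises here: value unclaimed (outside Pre_)
  | some (L, R, i', d) =>
    if d != 0 then ([], [], 0)               -- A raises "bracket not match"
    else
      -- for left_idx, right_idx in zip(...): truthiness of the returned 'sum' = isSome
      let p := (L.zip R).foldl (fun acc lr =>
          if (pvTryConvert (find_prev_non_blank_token tokens (lr.1 - 1))).isSome
          then (acc.1 ++ [lr.1], acc.2 ++ [lr.2]) else acc) ([], [])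
      (p.1, p.2, min i' (tokens.length : Int))

-- ===== PORT B =====

-- one forward pass: prev[k] = nearest non-blank token at index ≤ k
def pvPrevAccum (last : Option String) : List String → List (Option String)
  | [] => []
  | t :: ts =>
    let last' := if PySem.Str.strip t ≠ "" then some t else last
    last' :: pvPrevAccum last' ts

-- B's single scan; lefts carry (index, agg-flag decided from prev); right_at is a dict;
-- `p in AGGREGATION_FUNCTIONS` is `p == some "SUM"` (the dict's only key);
-- prev[i-1] is an in-range non-negative index when i >= 1, so getD is exact.
def pvBLoop (tokens : List String) (prev : List (Option String)) :
    Nat → Int → Int → List (Int × Bool) → PySem.Dict Int Int →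
    Option (List (Int × Bool) × PySem.Dict Int Int × Int × Int)
  | 0, i, d, ls, rd => some (ls, rd, i, d)
  | f+1, i, d, ls, rd =>
    match PySem.List.pyGet? tokens i with
    | none => none
    | some t =>
      if t == "(" then
        let p : Option String := if 1 ≤ i then prev.getD (i-1).toNat none else none
        pvBLoop tokens prev f (i+1) (d+1) (ls ++ [(i, p == some "SUM")]) rd
      else if t == ")" then
        if d ≤ 0 then none
        else if d - 1 == 0 then some (ls, rd.insert (d-1) i, i+1, 0)
        else pvBLoop tokens prev f (i+1) (d-1) ls (rd.insert (d-1) i)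
      else pvBLoop tokens prev f (i+1) d ls rd

def find_matched_aggregation_function_brackets_alt (tokens : List String) (i : Int) : List Int × List Int × Int :=
  let prev := pvPrevAccum none tokens
  match pvBLoop tokens prev ((tokens.length : Int) - i).toNat i 0 [] PySem.Dict.empty with
  | none => ([], [], 0)
  | some (ls, rd, i', d) =>
    if d != 0 then ([], [], 0)
    else
      -- for k, (l, a) in enumerate(lefts): if a: append l; append right_at.get(k, -1)
      let p := (PySem.List.enumerate ls 0).foldl (fun acc kla =>
          if kla.2.2 then (acc.1 ++ [kla.2.1], acc.2 ++ [rd.getD kla.1 (-1)]) else acc) ([], [])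
      (p.1, p.2, min i' (tokens.length : Int))

-- ===== PRECONDITION & SPEC =====
-- Pre_ excludes exactly the inputs on which A raises: IndexError when the start index is
-- below -len (or negative on an empty list), and ValueError ("bracket not match") when,
-- among the brackets of the scanned token sequence, the first is ')' or no prefix balances.
def Pre_find_matched_aggregation_function_brackets (tokens : List String) (i : Int) : Prop :=
  (0 ≤ i ∨ (-(tokens.length : Int) ≤ i ∧ tokens ≠ [])) ∧
  (let S : List String :=
     if (tokens.length : Int) ≤ i then []
     else if 0 ≤ i then tokens.drop i.toNat
     else tokens.drop (tokens.length - (-i).toNat) ++ tokens;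
   let B : List String := S.filter (fun t => t == "(" || t == ")");
   B = [] ∨ (B.head? = some "(" ∧
     ∃ k ∈ List.range (B.length + 1), 0 < k ∧ (B.take k).count "(" = (B.take k).count ")"))
instance (tokens : List String) (i : Int) : Decidable (Pre_find_matched_aggregation_function_brackets tokens i) := by unfold Pre_find_matched_aggregation_function_brackets; infer_instance

def pvWitness_find_matched_aggregation_function_brackets : List String × Int := (["SUM", "(", "a", ")"], 0)

def Spec_find_matched_aggregation_function_brackets (tokens : List String) (i : Int) (out : List Int × List Int × Int) : Prop := out = find_matched_aggregation_function_brackets_alt tokens i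
instance (tokens : List String) (i : Int) (out : List Int × List Int × Int) : Decidable (Spec_find_matched_aggregation_function_brackets tokens i out) := by unfold Spec_find_matched_aggregation_function_brackets; infer_instance

-- ===== CLAIM (what is proved, stated in full; the proofs are below) =====
def Claim_equal_find_matched_aggregation_function_brackets : Prop := ∀ (tokens : List String) (i : Int), Dom_find_matched_aggregation_function_brackets tokens i → Pre_find_matched_aggregation_function_brackets tokens i → Spec_find_matched_aggregation_function_brackets tokens i (find_matched_aggregation_function_brackets tokens i)

-- ===== LEMMAS AND PROOFS =====

-- pvFindPrevAux generalized with a fallback value for the "ran past index 0" case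
def pvFPG (ts : List String) (last : Option String) : Nat → Option String
  | 0 => if PySem.Str.strip (ts.getD 0 "") ≠ "" then some (ts.getD 0 "") else last
  | k+1 => if PySem.Str.strip (ts.getD (k+1) "") ≠ "" then some (ts.getD (k+1) "")
           else pvFPG ts last k

lemma pvFPG_none (ts : List String) : ∀ k, pvFPG ts none k = pvFindPrevAux ts k := by
  intro k
  induction k with
  | zero => rfl
  | succ k ih => simp only [pvFPG, pvFindPrevAux, ih]

lemma pvFPG_cons (t : String) (ts : List String) (last : Option String) :
    ∀ k, pvFPG (t :: ts) last (k+1) =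
      pvFPG ts (if PySem.Str.strip t ≠ "" then some t else last) k := by
  intro k
  induction k with
  | zero => simp only [pvFPG, List.getD_cons_succ, List.getD_cons_zero]
  | succ k ih =>
    simp only [pvFPG, List.getD_cons_succ] at ih ⊢
    rw [ih]

lemma pvPrevAccum_getD (ts : List String) : ∀ (last : Option String) (k : Nat),
    (pvPrevAccum last ts).getD k none = if k < ts.length then pvFPG ts last k else none := by
  induction ts with
  | nil => intro last k; simp [pvPrevAccum]
  | cons t ts ih =>
    intro last k
    cases k with
    | zero => simp [pvPrevAccum, pvFPG]
    | succ k =>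
      simp only [pvPrevAccum, List.getD_cons_succ, ih, List.length_cons]
      by_cases hk : k < ts.length
      · rw [if_pos hk, if_pos (by omega : k + 1 < ts.length + 1), pvFPG_cons]
      · rw [if_neg hk, if_neg (by omega : ¬ k + 1 < ts.length + 1)]

-- the flag B computes at a '(' equals the condition A re-evaluates in its second pass
lemma pvFlag_eq (tokens : List String) (i : Int) (hi : i < (tokens.length : Int)) :
    ((if 1 ≤ i then (pvPrevAccum none tokens).getD (i-1).toNat none else none) == some "SUM")
      = (pvTryConvert (find_prev_non_blank_token tokens (i - 1))).isSome := by
  have hconv : ∀ x : Option String, (x == some "SUM") = (pvTryConvert x).isSome := by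
    intro x
    by_cases h : x == some "SUM" <;> simp [pvTryConvert, h]
  by_cases h1 : 1 ≤ i
  · have h0 : ¬ (i - 1 < 0 ∨ (tokens.length : Int) ≤ i - 1) := by omega
    have hk : (i - 1).toNat < tokens.length := by omega
    rw [if_pos h1, pvPrevAccum_getD, if_pos hk, pvFPG_none]
    rw [hconv]
    unfold find_prev_non_blank_token
    rw [if_neg h0]
  · have h0 : i - 1 < 0 ∨ (tokens.length : Int) ≤ i - 1 := by omega
    rw [if_neg h1, hconv]
    unfold find_prev_non_blank_token
    rw [if_pos h0]

-- invariant relating A's loop state to B's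
def pvRel (tokens : List String) (L R : List Int) (ls : List (Int × Bool))
    (rd : PySem.Dict Int Int) : Prop :=
  L = ls.map Prod.fst ∧ R.length = ls.length ∧
  (∀ k : Nat, k < ls.length → R.getD k 0 = rd.getD (k : Int) (-1)) ∧
  (∀ k : Int, (ls.length : Int) ≤ k → rd.get? k = none) ∧
  (∀ p ∈ ls, p.2 = (pvTryConvert (find_prev_non_blank_token tokens (p.1 - 1))).isSome)

lemma pvLoop_rel (tokens : List String) :
    ∀ (f : Nat) (i d : Int) (L R : List Int) (ls : List (Int × Bool)) (rd : PySem.Dict Int Int),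
      pvRel tokens L R ls rd → 0 ≤ d → d ≤ (ls.length : Int) →
      (pvALoop tokens f i d L R = none ∧
        pvBLoop tokens (pvPrevAccum none tokens) f i d ls rd = none) ∨
      (∃ L' R' ls' rd' i' d',
        pvALoop tokens f i d L R = some (L', R', i', d') ∧
        pvBLoop tokens (pvPrevAccum none tokens) f i d ls rd = some (ls', rd', i', d') ∧
        pvRel tokens L' R' ls' rd' ∧ 0 ≤ d' ∧ d' ≤ (ls'.length : Int)) := by
  intro f
  induction f with
  | zero =>
    intro i d L R ls rd hrel hd0 hdl
    exact Or.inr ⟨L, R, ls, rd, i, d, rfl, rfl, hrel, hd0, hdl⟩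
  | succ f ih =>
    intro i d L R ls rd hrel hd0 hdl
    obtain ⟨h1, h2, h3, h4, h5⟩ := hrel
    simp only [pvALoop, pvBLoop]
    cases hg : PySem.List.pyGet? tokens i with
    | none => exact Or.inl ⟨rfl, rfl⟩
    | some t =>
      have hilt : i < (tokens.length : Int) := by
        by_contra hge
        have : PySem.List.pyGet? tokens i = none := by
          rw [PySem.List.pyGet?_eq_none_iff]
          unfold PySem.Raise.InRange
          omega
        simp [this] at hg
      by_cases ht1 : t == "("
      · simp only [ht1, if_true]
        apply ih
        · refine ⟨by simp [h1], by simp [h2], ?_, ?_, ?_⟩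
          · intro k hk
            simp only [List.length_append, List.length_singleton] at hk
            by_cases hk' : k < ls.length
            · rw [List.getD_append R [-1] 0 k (by omega)]
              exact h3 k hk'
            · have hkeq : k = ls.length := by omega
              subst hkeq
              have hnone : rd.get? ((ls.length : Int)) = none := h4 _ le_rfl
              rw [show ((ls.length : Nat) : Int) = (ls.length : Int) from rfl] at hnone
              have hRlen : ls.length = R.length := h2.symm
              calc (R ++ [-1]).getD ls.length 0
                  = (R ++ [-1]).getD R.length 0 := by rw [hRlen]
                _ = -1 := by simp [List.getD_eq_getElem?_getD]
                _ = rd.getD (ls.length : Int) (-1) := by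
                    rw [PySem.Dict.getD_eq_get?_getD, hnone]; rfl
          · intro k hk
            apply h4
            simp only [List.length_append, List.length_singleton] at hk
            omega
          · intro p hp
            simp only [List.mem_append, List.mem_singleton] at hp
            rcases hp with hp | hp
            · exact h5 p hp
            · subst hp
              exact pvFlag_eq tokens i hilt
        · omega
        · simp; omega
      · simp only [ht1]
        by_cases ht2 : t == ")"
        · simp only [ht2, if_true]
          by_cases hdle : d ≤ 0
          · simp only [if_pos hdle]
            exact Or.inl ⟨rfl, rfl⟩
          · simp only [if_neg hdle]
            have hdpos : 0 < d := by omega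
            have hset : pvRel tokens L (R.set (d-1).toNat i) ls (rd.insert (d-1) i) := by
              refine ⟨h1, by simp [h2], ?_, ?_, h5⟩
              · intro k hk
                have hklen : k < R.length := by omega
                rw [PySem.Dict.getD_insert]
                rw [List.getD_eq_getElem _ _ (by simpa using hklen),
                    List.getElem_set]
                by_cases hkd : (k : Int) = d - 1
                · rw [if_pos hkd, if_pos (by omega : (d-1).toNat = k)]
                · rw [if_neg hkd, if_neg (by omega : ¬ (d-1).toNat = k)]
                  rw [← List.getD_eq_getElem R 0 hklen]
                  exact h3 k hk
              · intro k hk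
                rw [PySem.Dict.get?_insert, if_neg (by omega)]
                exact h4 k hk
            by_cases hd1 : d - 1 == 0
            · simp only [hd1, if_true]
              exact Or.inr ⟨L, R.set (d-1).toNat i, ls, rd.insert (d-1) i, i+1, 0,
                rfl, rfl, hset, le_rfl, by omega⟩
            · simp only [hd1]
              apply ih _ _ _ _ _ _ hset (by omega) (by omega)
        · simp only [ht2]
          exact ih _ _ _ _ _ _ ⟨h1, h2, h3, h4, h5⟩ hd0 hdl

-- the two output-building passes agree, given the invariant (s generalizes the enumerate start)
lemma pvPhase2 (tokens : List String) (rd : PySem.Dict Int Int) :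
    ∀ (ls : List (Int × Bool)) (s : Int) (L R : List Int) (acc : List Int × List Int),
      L = ls.map Prod.fst → R.length = ls.length →
      (∀ k : Nat, k < ls.length → R.getD k 0 = rd.getD (s + (k : Int)) (-1)) →
      (∀ p ∈ ls, p.2 = (pvTryConvert (find_prev_non_blank_token tokens (p.1 - 1))).isSome) →
      (L.zip R).foldl (fun acc lr =>
          if (pvTryConvert (find_prev_non_blank_token tokens (lr.1 - 1))).isSome
          then (acc.1 ++ [lr.1], acc.2 ++ [lr.2]) else acc) acc =
      (PySem.List.enumerate ls s).foldl (fun acc kla =>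
          if kla.2.2 then (acc.1 ++ [kla.2.1], acc.2 ++ [rd.getD kla.1 (-1)]) else acc) acc := by
  intro ls
  induction ls with
  | nil =>
    intro s L R acc h1 h2 h3 h5
    subst h1
    simp [PySem.List.enumerate_nil]
  | cons p ls ih =>
    intro s L R acc h1 h2 h3 h5
    obtain ⟨l, a⟩ := p
    cases R with
    | nil => simp at h2
    | cons r R =>
      subst h1
      rw [PySem.List.enumerate_cons]
      simp only [List.map_cons, List.zip_cons_cons, List.foldl_cons]
      have hflag : (pvTryConvert (find_prev_non_blank_token tokens (l - 1))).isSome = a :=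
        (h5 (l, a) (List.mem_cons_self)).symm
      have hr : r = rd.getD s (-1) := by
        have := h3 0 (by simp)
        simpa using this
      rw [hflag, hr]
      apply ih (s+1) _ R _ rfl (by simpa using h2)
      · intro k hk
        have := h3 (k+1) (by simp; omega)
        simp only [List.getD_cons_succ] at this
        rw [this]
        congr 1
        push_cast
        ring
      · intro q hq
        exact h5 q (List.mem_cons_of_mem _ hq)

-- ===== VERDICT (by name: the statement is the Claim_ definition above) =====
theorem find_matched_aggregation_function_brackets_spec : Claim_equal_find_matched_aggregation_function_brackets := by
  unfold Claim_equal_find_matched_aggregation_function_brackets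
  intro tokens i _hdom _hpre
  unfold Spec_find_matched_aggregation_function_brackets
  unfold find_matched_aggregation_function_brackets find_matched_aggregation_function_brackets_alt
  have hinit : pvRel tokens [] [] [] PySem.Dict.empty := by
    refine ⟨rfl, rfl, ?_, ?_, ?_⟩
    · intro k hk; simp at hk
    · intro k _; exact PySem.Dict.get?_empty k
    · intro p hp; simp at hp
  rcases pvLoop_rel tokens ((tokens.length : Int) - i).toNat i 0 [] [] [] PySem.Dict.empty
      hinit le_rfl (by simp) with ⟨ha, hb⟩ | ⟨L', R', ls', rd', i', d', ha, hb, hrel, _, _⟩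
  · simp only [ha, hb]
  · simp only [ha, hb]
    obtain ⟨h1, h2, h3, h4, h5⟩ := hrel
    by_cases hd : d' ≠ 0
    · simp [hd]
    · simp only [ne_eq, not_not] at hd
      subst hd
      simp only [bne_self_eq_false, Bool.false_eq_true, if_false]
      have := pvPhase2 tokens rd' ls' 0 L' R' ([], []) h1 h2
        (by intro k hk; simpa using h3 k hk) h5
      rw [this]
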